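-- pv_equiv track=rewrite | github.com/sagemath/sage-archive-2023-02-01 | src/sage/combinat/rsk.py | reverse_insertion
-- ===== SOURCE A (Python) =====
-- from bisect import bisect_left, bisect_right
--
-- def reverse_insertion(x, r):
--     """
--     Reverse bump the row ``r`` of the current insertion tableau ``p``
--     with number ``x``, provided that ``r`` is the ``i``-th row of ``p``.
--
--     The row ``r`` is modified in place. The bumped-out entry is returned.
--
--     EXAMPLES::
--
--         sage: from sage.combinat.rsk import RuleStar
--         sage: RuleStar().reverse_insertion(4, [1,2,3,5])
--         3
--         sage: RuleStar().reverse_insertion(1, [1,2,3,5])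
--         3
--         sage: RuleStar().reverse_insertion(5, [1,2,3,5])
--         5
--     """
--     if x in r:
--         y = x
--         while y in r:
--             y += 1
--         y -= 1
--     else:
--         y_pos = bisect_left(r, x) - 1
--         y = r[y_pos]
--         r[y_pos] = x
--     x = y
--     return x
-- ===== SOURCE B (Python) =====
-- from bisect import bisect_left
--
-- def reverse_insertion(x, r):
--     # When x occurs in r, one pass over sorted(set(r)) finds the end of the
--     # consecutive run starting at x (instead of repeated 'y in r' list scans);
--     # otherwise the usual reverse bump, mutating r like the original.
--     if x in r:
--         y = x
--         for v in sorted(set(r)):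
--             if v == y:
--                 y += 1
--         return y - 1
--     j = bisect_left(r, x) - 1
--     out = r[j]
--     r[j] = x
--     return out
-- ===== Notes on version B (the rewrite author's own statement) =====
-- stated objective: alternative
-- what changed: In the x-in-r branch A counts up with repeated 'y in r' list scans; B instead makes a single pass over sorted(set(r)) that advances a counter to find the end of the consecutive run; the not-found branch keeps the same bisect_left bump, and Pre_ excludes only r = [], on which both raise IndexError.
import Mathlib
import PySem

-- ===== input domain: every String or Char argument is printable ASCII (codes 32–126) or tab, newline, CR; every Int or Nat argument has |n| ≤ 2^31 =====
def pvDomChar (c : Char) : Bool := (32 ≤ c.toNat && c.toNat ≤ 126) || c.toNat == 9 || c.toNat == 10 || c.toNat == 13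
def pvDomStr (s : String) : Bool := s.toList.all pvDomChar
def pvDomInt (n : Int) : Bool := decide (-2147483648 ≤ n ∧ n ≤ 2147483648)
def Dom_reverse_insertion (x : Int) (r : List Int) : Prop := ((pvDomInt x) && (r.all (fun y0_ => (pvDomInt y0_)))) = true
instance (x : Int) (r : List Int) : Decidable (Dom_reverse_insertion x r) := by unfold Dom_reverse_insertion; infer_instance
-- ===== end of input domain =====

-- B replaces A's repeated 'y in r' membership loop by one pass over sorted(set(r));
-- both mutate r in the not-found branch identically, equivalence is about the return value.

-- ===== PORT A =====
-- 'y = x; while y in r: y += 1' — fuel r.length + 1 suffices (the r.length + 1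
-- consecutive candidate values cannot all lie in r), so the loop is faithful.
def pvLoopA (r : List Int) (y : Int) : Nat → Int
  | 0 => y
  | n + 1 => if y ∈ r then pvLoopA r (y + 1) n else y

def reverse_insertion (x : Int) (r : List Int) : Int :=
  if x ∈ r then
    pvLoopA r x (r.length + 1) - 1
  else
    -- y_pos may be -1 (Python negative indexing); r = [] (IndexError) is excluded by Pre_
    PySem.List.pyGetD r ((PySem.List.bisectLeft r x : Int) - 1) 0

-- ===== PORT B =====
def reverse_insertion_alt (x : Int) (r : List Int) : Int :=
  if x ∈ r then
    ((PySem.List.sorted (PySem.Set.ofList r) (fun v => v)).foldl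
      (fun y v => if v = y then y + 1 else y) x) - 1
  else PySem.List.pyGetD r ((PySem.List.bisectLeft r x : Int) - 1) 0

-- ===== PRECONDITION & SPEC =====
-- Pre_ excludes only r = [], on which both Pythons raise IndexError (r[-1]).
def Pre_reverse_insertion (x : Int) (r : List Int) : Prop := r ≠ []
instance (x : Int) (r : List Int) : Decidable (Pre_reverse_insertion x r) := by
  unfold Pre_reverse_insertion; infer_instance
def pvWitness_reverse_insertion : Int × List Int := (4, [1, 2, 3, 5])

def Spec_reverse_insertion (x : Int) (r : List Int) (out : Int) : Prop := out = reverse_insertion_alt x r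
instance (x : Int) (r : List Int) (out : Int) : Decidable (Spec_reverse_insertion x r out) := by unfold Spec_reverse_insertion; infer_instance

-- ===== CLAIM (what is proved, stated in full; the proofs are below) =====
def Claim_equal_reverse_insertion : Prop := ∀ (x : Int) (r : List Int), Dom_reverse_insertion x r → Pre_reverse_insertion x r → Spec_reverse_insertion x r (reverse_insertion x r)

-- ===== LEMMAS AND PROOFS =====

-- Both branches that search for the end of the run compute the unique y with
-- x ≤ y, y ∉ r and every value in [x, y) in r.  pvP names that characterisation.
def pvP (r : List Int) (x y : Int) : Prop :=
  x ≤ y ∧ y ∉ r ∧ ∀ k : Int, x ≤ k → k < y → k ∈ r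

theorem pvP_unique {r : List Int} {x a b : Int} (ha : pvP r x a) (hb : pvP r x b) : a = b := by
  rcases ha with ⟨hxa, hna, hia⟩
  rcases hb with ⟨hxb, hnb, hib⟩
  rcases lt_trichotomy a b with h | h | h
  · exact absurd (hib a hxa h) hna
  · exact h
  · exact absurd (hia b hxb h) hnb

-- some value in [y, y + r.length + 1) is not in r (pigeonhole)
theorem pv_exists_gap (r : List Int) (y : Int) :
    ∃ k : Int, y ≤ k ∧ k < y + (r.length + 1) ∧ k ∉ r := by
  by_contra h
  push Not at h
  have hsub : Finset.Icc y (y + r.length) ⊆ r.toFinset := by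
    intro k hk
    rw [Finset.mem_Icc] at hk
    rw [List.mem_toFinset]
    exact h k hk.1 (by omega)
  have hcard := Finset.card_le_card hsub
  rw [Int.card_Icc] at hcard
  have hlen := r.toFinset_card_le
  omega

theorem pvLoopA_spec (r : List Int) :
    ∀ (fuel : Nat) (y : Int), (∃ k : Int, y ≤ k ∧ k < y + fuel ∧ k ∉ r) →
      pvP r y (pvLoopA r y fuel) := by
  intro fuel
  induction fuel with
  | zero => intro y ⟨k, h1, h2, _⟩; omega
  | succ n ih =>
    intro y ⟨k, h1, h2, h3⟩
    by_cases hy : y ∈ r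
    · simp only [pvLoopA, if_pos hy]
      have hk1 : y + 1 ≤ k := by
        rcases eq_or_lt_of_le h1 with rfl | h
        · exact absurd hy h3
        · omega
      obtain ⟨hle, hnot, hiv⟩ := ih (y + 1) ⟨k, hk1, by omega, h3⟩
      refine ⟨by omega, hnot, fun m hm1 hm2 => ?_⟩
      rcases eq_or_lt_of_le hm1 with rfl | h
      · exact hy
      · exact hiv m (by omega) hm2
    · simp only [pvLoopA, if_neg hy]
      exact ⟨le_refl _, hy, fun m h1 h2 => absurd h1 (by omega)⟩

-- folding B's step over a list whose elements all differ from y leaves y unchanged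
theorem pv_fold_const {l : List Int} {y : Int} (h : ∀ u ∈ l, u ≠ y) :
    l.foldl (fun y v => if v = y then y + 1 else y) y = y := by
  induction l with
  | nil => rfl
  | cons v t ih =>
    simp only [List.foldl_cons, if_neg (h v (by simp))]
    exact ih fun u hu => h u (by simp [hu])

theorem pv_foldB_spec : ∀ (l : List Int), l.Pairwise (· < ·) → ∀ y : Int,
    y ≤ l.foldl (fun y v => if v = y then y + 1 else y) y ∧
    l.foldl (fun y v => if v = y then y + 1 else y) y ∉ l ∧
    ∀ k : Int, y ≤ k → k < l.foldl (fun y v => if v = y then y + 1 else y) y → k ∈ l := by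
  intro l hl
  induction l with
  | nil =>
    intro y
    simp only [List.foldl_nil, List.not_mem_nil, not_false_iff]
    exact ⟨le_refl _, trivial, fun k h1 h2 => absurd h1 (by omega)⟩
  | cons v t ih =>
    rw [List.pairwise_cons] at hl
    obtain ⟨hv, ht⟩ := hl
    intro y
    simp only [List.foldl_cons]
    by_cases hvy : v = y
    · rw [if_pos hvy]
      subst hvy
      obtain ⟨hle, hnot, hiv⟩ := ih ht (v + 1)
      refine ⟨by omega, ?_, fun k h1 h2 => ?_⟩
      · intro hmem
        rcases List.mem_cons.mp hmem with h | h
        · omega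
        · exact hnot h
      · rcases eq_or_lt_of_le h1 with rfl | h
        · exact List.mem_cons_self
        · exact List.mem_cons_of_mem _ (hiv k (by omega) h2)
    · rw [if_neg hvy]
      rcases lt_trichotomy v y with hlt | heq | hgt
      · obtain ⟨hle, hnot, hiv⟩ := ih ht y
        refine ⟨hle, ?_, fun k h1 h2 => List.mem_cons_of_mem _ (hiv k h1 h2)⟩
        intro hmem
        rcases List.mem_cons.mp hmem with h | h
        · omega
        · exact hnot h
      · exact absurd heq hvy
      · have hconst : t.foldl (fun y v => if v = y then y + 1 else y) y = y :=
          pv_fold_const fun u hu => by have := hv u hu; omega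
        rw [hconst]
        refine ⟨le_refl _, ?_, fun k h1 h2 => absurd h1 (by omega)⟩
        intro hmem
        rcases List.mem_cons.mp hmem with h | h
        · omega
        · have := hv y h; omega

-- B's fold over sorted(set(r)) satisfies pvP with membership read in r
theorem pv_foldB_pvP (r : List Int) (x : Int) :
    pvP r x ((PySem.List.sorted (PySem.Set.ofList r) (fun v => v)).foldl
      (fun y v => if v = y then y + 1 else y) x) := by
  have hsorted := PySem.List.sorted_ofList_pairwise_lt (κ := Int) r
  obtain ⟨h1, h2, h3⟩ := pv_foldB_spec _ hsorted x
  have hmem : ∀ v : Int, v ∈ PySem.List.sorted (PySem.Set.ofList r) (fun v => v) ↔ v ∈ r := by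
    intro v
    rw [PySem.List.mem_sorted, PySem.Set.mem_ofList]
  exact ⟨h1, fun h => h2 ((hmem _).mpr h), fun k hk1 hk2 => (hmem _).mp (h3 k hk1 hk2)⟩

-- ===== VERDICT (by name: the statement is the Claim_ definition above) =====
theorem reverse_insertion_spec : Claim_equal_reverse_insertion := by
  intro x r _ _
  simp only [Spec_reverse_insertion, reverse_insertion, reverse_insertion_alt]
  by_cases hx : x ∈ r
  · have hA := pvLoopA_spec r (r.length + 1) x (pv_exists_gap r x)
    have heq := pvP_unique hA (pv_foldB_pvP r x)
    rw [if_pos hx, if_pos hx, heq]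
  · rw [if_neg hx, if_neg hx]
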